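-- pv_equiv track=rewrite | github.com/Spectating101/solarpunk-coin | solarpunkcoin/consensus/pos.py | check_double_sign
-- ===== SOURCE A (Python) =====
-- from typing import List, Dict, Optional, Tuple
--
-- def check_double_sign(
--     validator_signatures: Dict[int, List[Tuple[str, str]]]  # height -> [(validator, block_hash)]
-- ) -> List[Tuple[str, str]]:
--     """
--     Detect double-signing violations.
--
--     Returns:
--         List of (validator_address, evidence)
--     """
--     violations = []
--
--     for height, signatures in validator_signatures.items():
--         # Group by validator
--         by_validator = {}
--         for validator, block_hash in signatures:
--             if validator not in by_validator:
--                 by_validator[validator] = []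
--             by_validator[validator].append(block_hash)
--
--         # Check for multiple signatures at same height
--         for validator, block_hashes in by_validator.items():
--             if len(set(block_hashes)) > 1:
--                 evidence = f"Double sign at height {height}: {block_hashes}"
--                 violations.append((validator, evidence))
--
--     return violations
-- ===== SOURCE B (Python) =====
-- def check_double_sign(validator_signatures):
--     """Detect double-signing violations without building a hash-of-lists:
--     ordered dedup of validators, then a filtering rescan per validator."""
--     violations = []
--     for height, signatures in validator_signatures.items():
--         validators = list(dict.fromkeys(v for v, _ in signatures))
--         for validator in validators:
--             hashes = [h for v, h in signatures if v == validator]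
--             if len(set(hashes)) > 1:
--                 violations.append((validator, f"Double sign at height {height}: {hashes}"))
--     return violations
-- ===== Notes on version B (the rewrite author's own statement) =====
-- stated objective: alternative
-- what changed: Replaces the per-height dict-of-lists grouping with an ordered dedup of validators followed by a filtering rescan of the signature list per validator (no dict at all); output order and evidence strings are identical.
import Mathlib
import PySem

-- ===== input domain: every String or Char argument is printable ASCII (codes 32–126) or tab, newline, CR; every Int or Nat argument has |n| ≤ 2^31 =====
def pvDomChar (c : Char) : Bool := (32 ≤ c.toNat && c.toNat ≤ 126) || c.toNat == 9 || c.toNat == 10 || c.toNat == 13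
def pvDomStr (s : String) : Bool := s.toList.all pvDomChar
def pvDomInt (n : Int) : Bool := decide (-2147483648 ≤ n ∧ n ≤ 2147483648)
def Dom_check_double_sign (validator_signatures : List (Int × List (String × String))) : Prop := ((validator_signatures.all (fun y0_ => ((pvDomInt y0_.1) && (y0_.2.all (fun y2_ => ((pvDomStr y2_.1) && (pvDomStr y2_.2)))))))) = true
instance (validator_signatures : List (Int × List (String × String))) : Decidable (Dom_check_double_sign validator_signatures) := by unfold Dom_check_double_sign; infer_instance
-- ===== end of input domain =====

-- B differs from A only in how each height's signatures are grouped (ordered dedup +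
-- filtering rescan instead of a dict of lists); evidence strings and order are identical.

-- shared helpers: Python's repr of a printable-ASCII/tab/newline/CR string and of a list of
-- such strings, and the f-string evidence message (exact on the stated ASCII domain)
def pyReprStr (s : String) : String :=
  let cs := s.toList
  let q : Char := if cs.contains '\'' && !(cs.contains '"') then '"' else '\''
  let esc := cs.flatMap (fun c =>
    if c = '\\' then ['\\', '\\']
    else if c = '\t' then ['\\', 't']
    else if c = '\n' then ['\\', 'n']
    else if c = '\r' then ['\\', 'r']
    else if c = q then ['\\', q]
    else [c])
  String.ofList (q :: (esc ++ [q]))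

def pyReprStrList (l : List String) : String :=
  "[" ++ String.intercalate ", " (l.map pyReprStr) ++ "]"

def evidenceStr (h : Int) (hashes : List String) : String :=
  "Double sign at height " ++ PySem.Int.toStr h ++ ": " ++ pyReprStrList hashes

-- ===== PORT A =====
def check_double_sign (validator_signatures : List (Int × List (String × String))) : List (String × String) :=
  validator_signatures.foldl (fun violations hp =>
    -- group by validator ('if validator not in by_validator: … = []; append' = modify with default [])
    let by_validator : PySem.Dict String (List String) :=
      hp.2.foldl (fun d p => d.modify p.1 [] (fun l => l ++ [p.2])) PySem.Dict.empty
    by_validator.items.foldl (fun vio kv =>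
      if (PySem.Set.ofList kv.2).length > 1 then vio ++ [(kv.1, evidenceStr hp.1 kv.2)] else vio)
      violations) []

-- ===== PORT B =====
def check_double_sign_alt (validator_signatures : List (Int × List (String × String))) : List (String × String) :=
  validator_signatures.foldl (fun violations hp =>
    (PySem.List.dedup (hp.2.map (·.1))).foldl (fun vio v =>
      let hashes := (hp.2.filter (fun p => p.1 == v)).map (·.2)
      if (PySem.Set.ofList hashes).length > 1 then vio ++ [(v, evidenceStr hp.1 hashes)] else vio)
      violations) []

-- ===== PRECONDITION & SPEC =====
def Spec_check_double_sign (validator_signatures : List (Int × List (String × String))) (out : List (String × String)) : Prop := out = check_double_sign_alt validator_signatures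
instance (validator_signatures : List (Int × List (String × String))) (out : List (String × String)) : Decidable (Spec_check_double_sign validator_signatures out) := by unfold Spec_check_double_sign; infer_instance

-- ===== CLAIM (what is proved, stated in full; the proofs are below) =====
def Claim_equal_check_double_sign : Prop := ∀ (validator_signatures : List (Int × List (String × String))), Dom_check_double_sign validator_signatures → Spec_check_double_sign validator_signatures (check_double_sign validator_signatures)

-- ===== LEMMAS AND PROOFS =====

-- A's per-height dict has exactly the validators in first-occurrence order as keys …
theorem items_group (sigs : List (String × String)) :
    (sigs.foldl (fun d p => d.modify p.1 [] (fun l => l ++ [p.2])) PySem.Dict.empty).items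
      = (PySem.List.dedup (sigs.map (·.1))).map
          (fun v => (v, (sigs.filter (fun p => p.1 == v)).map (·.2))) := by
  have hnd : (sigs.foldl (fun d p => d.modify p.1 [] (fun l => l ++ [p.2]))
      (PySem.Dict.empty : PySem.Dict String (List String))).keys.Nodup := by
    exact PySem.Dict.nodup_keys_foldl_modify_key sigs Prod.fst [] (fun d x l => l ++ [x.2]) _
      (by simp [pysem])
  rw [PySem.Dict.items_eq_map_keys _ hnd []]
  have hkeys : (sigs.foldl (fun d p => d.modify p.1 [] (fun l => l ++ [p.2]))
      (PySem.Dict.empty : PySem.Dict String (List String))).keys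
      = PySem.List.dedup (sigs.map (·.1)) := by
    rw [PySem.Dict.keys_foldl_modify_key sigs Prod.fst [] (fun d x l => l ++ [x.2]) _]
    simp [pysem, PySem.Set.update, PySem.Set.ofList]
  rw [hkeys]
  refine List.map_congr_left (fun v _ => ?_)
  rw [PySem.Dict.getD_foldl_modify_append]
  simp [pysem]

-- the two per-height inner loops coincide
theorem step_eq (acc : List (String × String)) (hp : Int × List (String × String)) :
    (hp.2.foldl (fun d p => d.modify p.1 [] (fun l => l ++ [p.2]))
        (PySem.Dict.empty : PySem.Dict String (List String))).items.foldl
      (fun vio kv =>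
        if (PySem.Set.ofList kv.2).length > 1 then vio ++ [(kv.1, evidenceStr hp.1 kv.2)] else vio)
      acc
    = (PySem.List.dedup (hp.2.map (·.1))).foldl
        (fun vio v =>
          let hashes := (hp.2.filter (fun p => p.1 == v)).map (·.2)
          if (PySem.Set.ofList hashes).length > 1 then vio ++ [(v, evidenceStr hp.1 hashes)] else vio)
        acc := by
  rw [items_group, List.foldl_map]

-- ===== VERDICT (by name: the statement is the Claim_ definition above) =====
theorem check_double_sign_spec : Claim_equal_check_double_sign := by
  intro vs _
  unfold Spec_check_double_sign check_double_sign check_double_sign_alt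
  simp only [step_eq]
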